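-- pv_equiv track=rewrite | github.com/delimatsuo/merlin | backend/app/jobs/capping.py | cap_new_jobs_by_source
-- ===== SOURCE A (Python) =====
-- from collections import Counter, deque
--
-- def cap_new_jobs_by_source(jobs: list[dict], max_jobs: int) -> list[dict]:
--     """Cap new jobs without letting the first source starve later sources.
--
--     Scrapers append sources in a fixed order. With Gupy first, a simple slice
--     can fill the whole extraction budget before Catho/Vagas/ProgramaThor are
--     ever processed. Round-robin keeps source order within each board while
--     guaranteeing every board gets extraction slots when it has new jobs.
--     """
--     if max_jobs <= 0:
--         return []
--     if len(jobs) <= max_jobs: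
--         return jobs
--
--     buckets: dict[str, deque[dict]] = {}
--     source_order: list[str] = []
--     for job in jobs:
--         source = job.get("source") or "unknown"
--         if source not in buckets:
--             buckets[source] = deque()
--             source_order.append(source)
--         buckets[source].append(job)
--
--     capped: list[dict] = []
--     while len(capped) < max_jobs:
--         added = False
--         for source in source_order:
--             bucket = buckets[source]
--             if not bucket:
--                 continue
--             capped.append(bucket.popleft())
--             added = True
--             if len(capped) >= max_jobs:
--                 break
--         if not added:
--             break
--
--     return capped
-- ===== SOURCE B (Python) =====
-- def cap_new_jobs_by_source(jobs: list[dict], max_jobs: int) -> list[dict]: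
--     """Cap new jobs fairly across sources: build the full round-robin order
--     column by column (k-th job of every source, sources in first-appearance
--     order), then truncate once to the budget."""
--     if max_jobs <= 0:
--         return []
--     if len(jobs) <= max_jobs:
--         return jobs
--
--     buckets: dict[str, list[dict]] = {}
--     for job in jobs:
--         source = job.get("source") or "unknown"
--         buckets.setdefault(source, []).append(job)
--
--     groups = list(buckets.values())
--     longest = max((len(g) for g in groups), default=0)
--     out: list[dict] = []
--     for k in range(longest):
--         for g in groups:
--             if k < len(g):
--                 out.append(g[k])
--     return out[:max_jobs]
-- ===== Notes on version B (the rewrite author's own statement) =====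
-- stated objective: simpler
-- what changed: Replaces A's destructive deque round-robin (while-loop with an 'added' flag, per-pass popleft and mid-pass break) by a non-mutating column-wise construction: emit the k-th job of every source group for k = 0..longest-1 and truncate the result once to max_jobs.
import Mathlib
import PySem

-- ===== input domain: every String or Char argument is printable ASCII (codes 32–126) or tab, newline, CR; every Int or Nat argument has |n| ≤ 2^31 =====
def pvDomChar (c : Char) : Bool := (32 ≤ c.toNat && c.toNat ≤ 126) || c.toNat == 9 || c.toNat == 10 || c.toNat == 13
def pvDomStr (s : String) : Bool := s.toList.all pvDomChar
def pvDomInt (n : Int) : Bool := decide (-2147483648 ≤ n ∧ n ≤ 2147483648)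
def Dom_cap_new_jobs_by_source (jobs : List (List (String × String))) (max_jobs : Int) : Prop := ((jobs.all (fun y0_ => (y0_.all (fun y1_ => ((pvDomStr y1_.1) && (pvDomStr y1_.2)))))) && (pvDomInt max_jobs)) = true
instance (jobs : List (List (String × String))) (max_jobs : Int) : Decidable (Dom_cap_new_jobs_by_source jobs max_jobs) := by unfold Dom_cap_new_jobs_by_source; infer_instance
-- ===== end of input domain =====

-- B replaces A's destructive deque round-robin (while-loop + 'added' flag + mid-pass break)
-- by a non-mutating column-wise construction truncated once at the end (objective: simpler).

-- ===== PORT A =====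
-- job.get("source") or "unknown"  (Python 'or': empty string is falsy)
def srcOf (job : List (String × String)) : String :=
  match (PySem.Dict.mk job).get? "source" with
  | some s => if s = "" then "unknown" else s
  | none => "unknown"

-- the first for-loop of A: buckets dict (deque = list) + source_order list
def buildA (jobs : List (List (String × String))) :
    PySem.Dict String (List (List (String × String))) × List String :=
  jobs.foldl (fun st job =>
    let s := srcOf job
    let st := if st.1.contains s then st else (st.1.insert s [], st.2 ++ [s])
    (st.1.insert s (st.1.getD s [] ++ [job]), st.2)) (PySem.Dict.empty, [])

-- one pass of A's inner 'for source in source_order' loop (with its break)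
def innerA (bkts : PySem.Dict String (List (List (String × String)))) (order : List String)
    (capped : List (List (String × String))) (added : Bool) (maxJ : Int) :
    PySem.Dict String (List (List (String × String))) × List (List (String × String)) × Bool :=
  match order with
  | [] => (bkts, capped, added)
  | s :: rest =>
    match bkts.getD s [] with
    | [] => innerA bkts rest capped added maxJ
    | j :: tl =>
      if maxJ ≤ ((capped ++ [j]).length : Int) then (bkts.insert s tl, capped ++ [j], true)
      else innerA (bkts.insert s tl) rest (capped ++ [j]) true maxJ

-- A's outer while-loop; fuel jobs.length + 1 suffices: each 'added' pass extends capped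
def loopA (fuel : Nat) (bkts : PySem.Dict String (List (List (String × String))))
    (order : List String) (capped : List (List (String × String))) (maxJ : Int) :
    List (List (String × String)) :=
  match fuel with
  | 0 => capped
  | fuel + 1 =>
    if (capped.length : Int) < maxJ then
      match innerA bkts order capped false maxJ with
      | (b', c', added) => if added then loopA fuel b' order c' maxJ else c'
    else capped

def cap_new_jobs_by_source (jobs : List (List (String × String))) (max_jobs : Int) :
    List (List (String × String)) :=
  if max_jobs ≤ 0 then []
  else if (jobs.length : Int) ≤ max_jobs then jobs
  else
    let st := buildA jobs
    loopA (jobs.length + 1) st.1 st.2 [] max_jobs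

-- ===== PORT B =====
-- buckets.setdefault(source, []).append(job)  =  d[source] = d.get(source, []) + [job]
def buildB (jobs : List (List (String × String))) :
    PySem.Dict String (List (List (String × String))) :=
  jobs.foldl (fun d job => d.modify (srcOf job) [] (· ++ [job])) PySem.Dict.empty

-- the two nested for-loops: column k of every group, k = 0 .. longest-1
def colsB (groups : List (List (List (String × String)))) (longest : Nat) :
    List (List (String × String)) :=
  (List.range longest).foldl (fun out k =>
    groups.foldl (fun out g => if h : k < g.length then out ++ [g[k]] else out) out) []

def cap_new_jobs_by_source_alt (jobs : List (List (String × String))) (max_jobs : Int) :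
    List (List (String × String)) :=
  if max_jobs ≤ 0 then []
  else if (jobs.length : Int) ≤ max_jobs then jobs
  else
    let groups := (buildB jobs).values
    let longest := (groups.map List.length).foldl Nat.max 0   -- max((len(g) for g in groups), default=0)
    (colsB groups longest).take max_jobs.toNat                -- out[:max_jobs]; exact: max_jobs > 0 here

-- ===== PRECONDITION & SPEC =====
def Spec_cap_new_jobs_by_source (jobs : List (List (String × String))) (max_jobs : Int) (out : List (List (String × String))) : Prop := out = cap_new_jobs_by_source_alt jobs max_jobs
instance (jobs : List (List (String × String))) (max_jobs : Int) (out : List (List (String × String))) : Decidable (Spec_cap_new_jobs_by_source jobs max_jobs out) := by unfold Spec_cap_new_jobs_by_source; infer_instance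

-- ===== CLAIM (what is proved, stated in full; the proofs are below) =====
def Claim_equal_cap_new_jobs_by_source : Prop := ∀ (jobs : List (List (String × String))) (max_jobs : Int), Dom_cap_new_jobs_by_source jobs max_jobs → Spec_cap_new_jobs_by_source jobs max_jobs (cap_new_jobs_by_source jobs max_jobs)

-- ===== LEMMAS AND PROOFS =====
-- abbreviations used only by the proofs
def heads (gs : List (List (List (String × String)))) : List (List (String × String)) :=
  gs.filterMap List.head?

def mx (gs : List (List (List (String × String)))) : Nat :=
  (gs.map List.length).foldl Nat.max 0

-- heads gs = [] iff every group is empty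
theorem heads_eq_nil {gs : List (List (List (String × String)))} :
    heads gs = [] ↔ ∀ g ∈ gs, g = [] := by
  induction gs with
  | nil => simp [heads]
  | cons g gs ih => cases g <;> simp [heads] at *

theorem mx_cons (g : List (List (String × String))) (gs : List (List (List (String × String)))) :
    mx (g :: gs) = Nat.max g.length (mx gs) := by
  have key : ∀ (ns : List Nat) (a : Nat), ns.foldl Nat.max a = Nat.max a (ns.foldl Nat.max 0) := by
    intro ns
    induction ns with
    | nil => simp
    | cons n ns ih =>
      intro a
      simp only [List.foldl_cons, ih (Nat.max a n), ih (Nat.max 0 n)]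
      simp [Nat.max_assoc]
  simp only [mx, List.map_cons, List.foldl_cons]
  simpa using key (gs.map List.length) (Nat.max 0 g.length)

theorem mx_eq_zero {gs : List (List (List (String × String)))} :
    mx gs = 0 ↔ ∀ g ∈ gs, g = [] := by
  induction gs with
  | nil => simp [mx]
  | cons g gs ih =>
    rw [mx_cons]
    simp [Nat.max_eq_zero_iff, ih, List.length_eq_zero_iff]

theorem mx_map_tail (gs : List (List (List (String × String)))) :
    mx (gs.map List.tail) = mx gs - 1 := by
  induction gs with
  | nil => simp [mx]
  | cons g gs ih =>
    simp only [List.map_cons, mx_cons, ih, List.length_tail]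
    exact Nat.sub_max_sub_right _ _ _

-- column k of a single group, as a 0/1-element list
def colk (k : Nat) (g : List (List (String × String))) : List (List (String × String)) :=
  match g[k]? with | some j => [j] | none => []

theorem inner_fold_eq (k : Nat) (gs : List (List (List (String × String))))
    (out : List (List (String × String))) :
    gs.foldl (fun out g => if h : k < g.length then out ++ [g[k]] else out) out
      = out ++ gs.flatMap (colk k) := by
  rw [PySem.List.foldl_congr_mem gs _ (fun out g => out ++ colk k g) out ?_,
    PySem.List.foldl_append_eq_flatMap]
  intro acc g _
  by_cases h : k < g.length
  · simp [colk, h, List.getElem?_eq_getElem h]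
  · simp [colk, h, List.getElem?_eq_none (by omega : g.length ≤ k)]

theorem colsB_eq_flatMap (gs : List (List (List (String × String)))) (n : Nat) :
    colsB gs n = (List.range n).flatMap (fun k => gs.flatMap (colk k)) := by
  unfold colsB
  rw [PySem.List.foldl_congr_mem _ _ (fun out k => out ++ gs.flatMap (colk k)) _
    (by intro acc k _; exact inner_fold_eq k gs acc)]
  rw [PySem.List.foldl_append_eq_flatMap]
  rfl

theorem heads_eq (gs : List (List (List (String × String)))) :
    heads gs = gs.flatMap (colk 0) := by
  induction gs with
  | nil => rfl
  | cons g gs ih => cases g <;> simp [heads, colk, ih] <;> simp [heads] at ih <;> exact ih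

theorem colk_succ (k : Nat) (g : List (List (String × String))) :
    colk (k + 1) g = colk k g.tail := by
  cases g <;> simp [colk]

theorem colsB_zero (gs : List (List (List (String × String)))) : colsB gs 0 = [] := rfl

theorem colsB_succ (gs : List (List (List (String × String)))) (n : Nat) :
    colsB gs (n + 1) = heads gs ++ colsB (gs.map List.tail) n := by
  rw [colsB_eq_flatMap, colsB_eq_flatMap, List.range_succ_eq_map, List.flatMap_cons, heads_eq]
  congr 1
  rw [List.flatMap_map]
  have hcol : ∀ k : Nat, gs.flatMap (colk (k + 1)) = (gs.map List.tail).flatMap (colk k) := by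
    intro k
    rw [List.flatMap_map]
    exact List.flatMap_congr (fun g _ => colk_succ k g)
  exact List.flatMap_congr (by intro k _; exact hcol k)

-- dict-as-list plumbing -----------------------------------------------------
theorem getD_mk_cons (p : String × List (List (String × String)))
    (l : List (String × List (List (String × String)))) (s : String) (hne : p.1 ≠ s) :
    (PySem.Dict.mk (p :: l)).getD s [] = (PySem.Dict.mk l).getD s [] := by
  obtain ⟨k, v⟩ := p
  simp only [PySem.Dict.getD_eq_get?_getD, PySem.Dict.get?_mk_cons]
  simp only [beq_iff_eq]
  rw [if_neg hne]

theorem getD_mk_cons_self (k : String) (v : List (List (String × String)))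
    (l : List (String × List (List (String × String)))) :
    (PySem.Dict.mk ((k, v) :: l)).getD k [] = v := by
  simp [PySem.Dict.getD_eq_get?_getD, PySem.Dict.get?_mk_cons]

theorem insert_mk_cons_self (k : String) (b v : List (List (String × String)))
    (l : List (String × List (List (String × String)))) (hk : k ∉ l.map Prod.fst) :
    (PySem.Dict.mk ((k, b) :: l)).insert k v = PySem.Dict.mk ((k, v) :: l) := by
  have hc : (PySem.Dict.mk ((k, b) :: l)).contains k = true := by
    simp [PySem.Dict.contains_mk]
  simp only [PySem.Dict.insert, hc, if_true]
  congr 1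
  simp only [PySem.Dict.items, List.map_cons, beq_self_eq_true, if_true]
  have : ∀ p ∈ l, (if (p.1 == k) = true then (k, v) else p) = p := by
    intro p hp
    rw [if_neg]
    simp only [beq_iff_eq]
    intro h
    exact hk (List.mem_map.mpr ⟨p, hp, h⟩)
  rw [List.map_congr_left this, List.map_id']

theorem insert_mk_cons (p : String × List (List (String × String)))
    (l : List (String × List (List (String × String)))) (s : String)
    (v : List (List (String × String))) (hne : p.1 ≠ s) :
    (PySem.Dict.mk (p :: l)).insert s v
      = PySem.Dict.mk (p :: ((PySem.Dict.mk l).insert s v).items) := by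
  obtain ⟨k, b⟩ := p
  have hkb : ((k, b).1 == s) = false := by simpa using hne
  have hc : (PySem.Dict.mk ((k, b) :: l)).contains s = (PySem.Dict.mk l).contains s := by
    simp [PySem.Dict.contains_mk, List.any_cons, hkb]
  by_cases h : (PySem.Dict.mk l).contains s = true
  · simp only [PySem.Dict.insert, hc, h, if_true]
    congr 1
    simp only [PySem.Dict.items, List.map_cons, hkb]
    simp
  · simp only [PySem.Dict.insert, hc, h, Bool.false_eq_true, if_false,
      eq_false_of_ne_true h, if_neg]
    rfl

theorem innerA_frame (p : String × List (List (String × String)))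
    (l : List (String × List (List (String × String)))) (order : List String)
    (hp : p.1 ∉ order) (capped : List (List (String × String))) (added : Bool) (maxJ : Int) :
    innerA (PySem.Dict.mk (p :: l)) order capped added maxJ
      = ((PySem.Dict.mk (p :: (innerA (PySem.Dict.mk l) order capped added maxJ).1.items)),
         (innerA (PySem.Dict.mk l) order capped added maxJ).2) := by
  induction order generalizing l capped added with
  | nil => simp [innerA]
  | cons s rest ih =>
    have hne : p.1 ≠ s := by intro h; exact hp (h ▸ List.mem_cons_self)
    have hrest : p.1 ∉ rest := fun h => hp (List.mem_cons_of_mem _ h)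
    rw [innerA, innerA, getD_mk_cons p l s hne]
    cases hgd : (PySem.Dict.mk l).getD s [] with
    | nil => exact ih l hrest capped added
    | cons j tl =>
      dsimp only
      rw [insert_mk_cons p l s tl hne]
      split_ifs with hstop
      · rfl
      · exact ih ((PySem.Dict.mk l).insert s tl).items hrest (capped ++ [j]) true

theorem mapTail_of_heads_nil {l : List (String × List (List (String × String)))}
    (h : heads (l.map Prod.snd) = []) :
    l.map (fun p => (p.1, p.2.tail)) = l := by
  rw [heads_eq_nil] at h
  induction l with
  | nil => rfl
  | cons q l ih =>
    have hq : q.2 = [] := h q.2 (by simp)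
    have ih' := ih (fun g hg => h g (by simp at hg ⊢; exact Or.inr hg))
    obtain ⟨a, b⟩ := q
    simp only at hq
    simp [hq, ih']

theorem innerA_le : ∀ (l : List (String × List (List (String × String))))
    (capped : List (List (String × String))) (added : Bool) (maxJ : Int),
    (l.map Prod.fst).Nodup →
    (capped.length : Int) + (heads (l.map Prod.snd)).length ≤ maxJ →
    innerA (PySem.Dict.mk l) (l.map Prod.fst) capped added maxJ
      = (PySem.Dict.mk (l.map (fun p => (p.1, p.2.tail))),
         capped ++ heads (l.map Prod.snd),
         added || !(heads (l.map Prod.snd)).isEmpty) := by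
  intro l
  induction l with
  | nil => intro capped added maxJ _ _; simp [innerA, heads]
  | cons p l ih =>
    rintro capped added maxJ hnd hle
    obtain ⟨s, b⟩ := p
    simp only [List.map_cons, List.nodup_cons] at hnd
    obtain ⟨hs, hnd'⟩ := hnd
    simp only [List.map_cons] at hle ⊢
    rw [innerA, getD_mk_cons_self]
    cases b with
    | nil =>
      rw [innerA_frame (s, []) l _ hs, ih capped added maxJ hnd' (by
        simpa [heads] using hle)]
      simp [heads]
    | cons j tl =>
      have hheads : heads ((j :: tl) :: l.map Prod.snd) = j :: heads (l.map Prod.snd) := by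
        simp [heads]
      dsimp only
      rw [insert_mk_cons_self s (j :: tl) tl l hs]
      split_ifs with hstop
      · have hstop2 : maxJ ≤ (capped.length : Int) + 1 := by simpa using hstop
        have hlen : (heads (l.map Prod.snd)).length = 0 := by
          rw [hheads] at hle
          simp only [List.length_cons] at hle
          push_cast at hle
          omega
        have hnil : heads (l.map Prod.snd) = [] := List.length_eq_zero_iff.mp hlen
        rw [hheads, hnil]
        have hmt := mapTail_of_heads_nil hnil
        simp [hmt]
      · have hstop2 : ¬ maxJ ≤ (capped.length : Int) + 1 := by simpa using hstop
        rw [innerA_frame (s, tl) l _ hs, ih (capped ++ [j]) true maxJ hnd' (by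
          rw [hheads] at hle
          simp only [List.length_append, List.length_cons, List.length_nil] at hle ⊢
          push_cast
          push_cast at hle
          omega)]
        rw [hheads]
        simp [List.append_assoc]

theorem innerA_gt : ∀ (l : List (String × List (List (String × String))))
    (capped : List (List (String × String))) (added : Bool) (maxJ : Int),
    (l.map Prod.fst).Nodup →
    (capped.length : Int) < maxJ →
    maxJ < (capped.length : Int) + (heads (l.map Prod.snd)).length →
    (innerA (PySem.Dict.mk l) (l.map Prod.fst) capped added maxJ).2
      = (capped ++ (heads (l.map Prod.snd)).take (maxJ - capped.length).toNat, true) := by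
  intro l
  induction l with
  | nil =>
    intro capped added maxJ _ hlt hgt
    simp [heads] at hgt
    omega
  | cons p l ih =>
    rintro capped added maxJ hnd hlt hgt
    obtain ⟨s, b⟩ := p
    simp only [List.map_cons, List.nodup_cons] at hnd
    obtain ⟨hs, hnd'⟩ := hnd
    simp only [List.map_cons] at hgt ⊢
    rw [innerA, getD_mk_cons_self]
    cases b with
    | nil =>
      rw [innerA_frame (s, []) l _ hs]
      exact ih capped added maxJ hnd' hlt (by simpa [heads] using hgt)
    | cons j tl =>
      have hheads : heads ((j :: tl) :: l.map Prod.snd) = j :: heads (l.map Prod.snd) := by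
        simp [heads]
      dsimp only
      rw [insert_mk_cons_self s (j :: tl) tl l hs]
      split_ifs with hstop
      · have hstop2 : maxJ ≤ (capped.length : Int) + 1 := by simpa using hstop
        have h1 : (maxJ - (capped.length : Int)).toNat = 1 := by omega
        rw [hheads, h1]
        simp
      · have hstop2 : ¬ maxJ ≤ (capped.length : Int) + 1 := by simpa using hstop
        rw [innerA_frame (s, tl) l _ hs]
        have hrec := ih (capped ++ [j]) true maxJ hnd' (by
            simp only [List.length_append, List.length_cons, List.length_nil]
            push_cast
            omega) (by
            rw [hheads] at hgt
            simp only [List.length_append, List.length_cons, List.length_nil] at hgt ⊢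
            push_cast
            push_cast at hgt
            omega)
        rw [hrec, hheads]
        have harith : (maxJ - (capped.length : Int)).toNat
            = ((maxJ - ((capped ++ [j]).length : Int)).toNat) + 1 := by
          simp only [List.length_append, List.length_cons, List.length_nil]
          push_cast
          omega
        rw [harith]
        simp [List.take_succ_cons]

theorem loopA_stop (f : Nat) (b : PySem.Dict String (List (List (String × String))))
    (order : List String) (c : List (List (String × String))) (maxJ : Int)
    (h : maxJ ≤ (c.length : Int)) : loopA f b order c maxJ = c := by
  cases f <;> simp [loopA, not_lt.mpr h]

theorem loopA_spec : ∀ (fuel : Nat) (l : List (String × List (List (String × String))))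
    (capped : List (List (String × String))) (maxJ : Int),
    (l.map Prod.fst).Nodup →
    (capped.length : Int) < maxJ →
    maxJ - capped.length ≤ (fuel : Int) →
    loopA fuel (PySem.Dict.mk l) (l.map Prod.fst) capped maxJ
      = capped ++ (colsB (l.map Prod.snd) (mx (l.map Prod.snd))).take (maxJ - capped.length).toNat := by
  intro fuel
  induction fuel with
  | zero =>
    intro l capped maxJ _ hlt hfu
    exfalso
    simp only [Nat.cast_zero] at hfu
    omega
  | succ fuel ih =>
    intro l capped maxJ hnd hlt hfu
    rw [loopA, if_pos hlt]
    by_cases hnil : heads (l.map Prod.snd) = []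
    · rw [innerA_le l capped false maxJ hnd (by rw [hnil]; simpa using le_of_lt hlt)]
      have hmx : mx (l.map Prod.snd) = 0 := mx_eq_zero.mpr (heads_eq_nil.mp hnil)
      rw [hnil, hmx, colsB_zero]
      simp
    · have hmx0 : mx (l.map Prod.snd) ≠ 0 := fun h => hnil (heads_eq_nil.mpr (mx_eq_zero.mp h))
      have hE : (heads (l.map Prod.snd)).isEmpty = false := by
        simpa [List.isEmpty_iff] using hnil
      have hcols : colsB (l.map Prod.snd) (mx (l.map Prod.snd))
          = heads (l.map Prod.snd)
            ++ colsB ((l.map Prod.snd).map List.tail) (mx (l.map Prod.snd) - 1) := by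
        conv_lhs => rw [show mx (l.map Prod.snd) = (mx (l.map Prod.snd) - 1) + 1 by omega]
        exact colsB_succ _ _
      by_cases hle : (capped.length : Int) + (heads (l.map Prod.snd)).length ≤ maxJ
      · rw [innerA_le l capped false maxJ hnd hle]
        dsimp only
        rw [hE]
        simp only [Bool.not_false, Bool.false_or, if_true]
        by_cases hfull : maxJ ≤ ((capped ++ heads (l.map Prod.snd)).length : Int)
        · rw [loopA_stop _ _ _ _ _ hfull]
          have hlen : (maxJ - (capped.length : Int)).toNat = (heads (l.map Prod.snd)).length := by
            simp only [List.length_append] at hfull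
            push_cast at hfull
            omega
          rw [hcols, List.take_append, hlen, List.take_length, Nat.sub_self, List.take_zero,
            List.append_nil]
        · have horder : (l.map (fun p => (p.1, p.2.tail))).map Prod.fst = l.map Prod.fst := by
            simp
          have hsnd : (l.map (fun p => (p.1, p.2.tail))).map Prod.snd
              = (l.map Prod.snd).map List.tail := by
            simp
          rw [← horder]
          rw [ih (l.map (fun p => (p.1, p.2.tail))) (capped ++ heads (l.map Prod.snd)) maxJ
            (by rw [horder]; exact hnd)
            (by simpa using hfull)
            (by
              simp only [List.length_append]
              push_cast
              push_cast at hfu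
              have : 1 ≤ (heads (l.map Prod.snd)).length := by
                cases h : heads (l.map Prod.snd) with
                | nil => exact absurd h hnil
                | cons a t => simp [h]
              omega)]
          rw [hsnd, mx_map_tail, hcols, List.take_append]
          have ht1 : (heads (l.map Prod.snd)).length ≤ (maxJ - (capped.length : Int)).toNat := by
            simp only [List.length_append] at hfull
            push_cast at hfull
            omega
          rw [List.take_of_length_le ht1]
          have ht2 : (maxJ - (((capped ++ heads (l.map Prod.snd))).length : Int)).toNat
              = (maxJ - (capped.length : Int)).toNat - (heads (l.map Prod.snd)).length := by
            simp only [List.length_append]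
            push_cast
            omega
          rw [ht2, List.append_assoc]
      · push Not at hle
        have h2 := innerA_gt l capped false maxJ hnd hlt hle
        have heq : innerA (PySem.Dict.mk l) (l.map Prod.fst) capped false maxJ
            = ((innerA (PySem.Dict.mk l) (l.map Prod.fst) capped false maxJ).1,
               capped ++ (heads (l.map Prod.snd)).take (maxJ - capped.length).toNat, true) := by
          rw [← h2]
        rw [heq]
        dsimp only
        rw [if_pos rfl]
        have htle : (maxJ - (capped.length : Int)).toNat ≤ (heads (l.map Prod.snd)).length := by
          omega
        rw [loopA_stop _ _ _ _ _ (by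
          simp only [List.length_append, List.length_take]
          push_cast
          omega)]
        rw [hcols, List.take_append, Nat.sub_eq_zero_of_le htle, List.take_zero, List.append_nil]

theorem build_rel : ∀ (jobs : List (List (String × String)))
    (d : PySem.Dict String (List (List (String × String)))) (order : List String),
    order = d.keys →
    jobs.foldl (fun st job =>
      let s := srcOf job
      let st := if st.1.contains s then st else (st.1.insert s [], st.2 ++ [s])
      (st.1.insert s (st.1.getD s [] ++ [job]), st.2)) (d, order)
      = (jobs.foldl (fun d job => d.modify (srcOf job) [] (· ++ [job])) d,
         (jobs.foldl (fun d job => d.modify (srcOf job) [] (· ++ [job])) d).keys) := by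
  intro jobs
  induction jobs with
  | nil => intro d order h; simp [h]
  | cons job jobs ih =>
    intro d order h
    simp only [List.foldl_cons]
    by_cases hc : d.contains (srcOf job) = true
    · rw [if_pos hc]
      exact ih _ _ (by
        show order = (d.modify (srcOf job) [] (fun x => x ++ [job])).keys
        rw [PySem.Dict.keys_modify, PySem.Dict.keys_insert_of_contains _ _ hc]
        exact h)
    · have hc' : d.contains (srcOf job) = false := by simpa using hc
      rw [if_neg (by simp [hc'])]
      have hmod : d.modify (srcOf job) [] (fun x => x ++ [job]) = d.insert (srcOf job) [job] := by
        show d.insert (srcOf job) (d.getD (srcOf job) [] ++ [job]) = _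
        rw [PySem.Dict.getD_of_not_contains _ _ hc']
        simp
      rw [hmod]
      dsimp only
      rw [show (d.insert (srcOf job) []).insert (srcOf job)
            ((d.insert (srcOf job) []).getD (srcOf job) [] ++ [job]) = d.insert (srcOf job) [job] by
          rw [PySem.Dict.getD_insert_self, PySem.Dict.insert_insert_self]
          simp]
      exact ih _ _ (by
        rw [PySem.Dict.keys_insert_of_not_contains _ _ hc', h])

theorem cap_new_jobs_by_source_spec : Claim_equal_cap_new_jobs_by_source := by
  intro jobs max_jobs _
  unfold Spec_cap_new_jobs_by_source cap_new_jobs_by_source cap_new_jobs_by_source_alt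
  by_cases h1 : max_jobs ≤ 0
  · simp [h1]
  · by_cases h2 : (jobs.length : Int) ≤ max_jobs
    · simp [h1, h2]
    · simp only [h1, h2, if_false]
      have hA : buildA jobs = (buildB jobs, (buildB jobs).keys) :=
        build_rel jobs PySem.Dict.empty [] rfl
      rw [hA]
      have hnd : ((buildB jobs).items.map Prod.fst).Nodup :=
        PySem.Dict.nodup_keys_foldl_modify_key jobs srcOf []
          (fun _ job v => v ++ [job]) PySem.Dict.empty List.nodup_nil
      have hmain := loopA_spec (jobs.length + 1) (buildB jobs).items [] max_jobs hnd
        (by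
          simp only [List.length_nil, Nat.cast_zero]
          omega)
        (by
          simp only [List.length_nil, Nat.cast_zero, Int.sub_zero]
          push_cast
          omega)
      have h0 : max_jobs - ((([] : List (List (String × String))).length : Nat) : Int)
          = max_jobs := by simp
      rw [h0] at hmain
      simpa using hmain
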